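-- pv_equiv track=rewrite | github.com/z-gong/mstk | mstk/chem/formula.py | _expand_chars
-- ===== SOURCE A (Python) =====
-- def _expand_chars(chars):
--     chars = chars[:]
--     temp_expanded_chars = []
--     temp_chars = []
--     while '(' in chars:
--         _start = False
--         i = 0
--         while i < len(chars):
--             c = chars[i]
--             if c == '(':
--                 _start = True
--                 temp_expanded_chars = chars[:i]
--                 temp_chars = []
--                 i += 1
--             elif c == ')':
--                 if not _start:
--                     raise Exception('Unmatched brackets')
--                 if i + 1 < len(chars) and chars[i + 1].isdigit():
--                     n = int(chars[i + 1])
--                     temp_expanded_chars += temp_chars * n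
--                     if i + 2 < len(chars):
--                         temp_expanded_chars += chars[i + 2:]
--                 else:
--                     n = 1
--                     temp_expanded_chars += temp_chars * n
--                     if i + 1 < len(chars):
--                         temp_expanded_chars += chars[i + 1:]
--                 chars = temp_expanded_chars
--                 break
--             else:
--                 if _start:
--                     temp_chars.append(c)
--                 i += 1
--
--     return chars
-- ===== SOURCE B (Python) =====
-- def _expand_chars(chars):
--     stack = []
--     out = []
--     i = 0
--     n_chars = len(chars)
--     while i < n_chars:
--         c = chars[i]
--         if c == '(':
--             stack.append(out)
--             out = []
--             i += 1
--         elif c == ')':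
--             if not stack:
--                 raise Exception('Unmatched brackets')
--             prev = stack.pop()
--             if i + 1 < n_chars and chars[i + 1].isdigit():
--                 out = prev + out * int(chars[i + 1])
--                 i += 2
--             else:
--                 out = prev + out
--                 i += 1
--         else:
--             out.append(c)
--             i += 1
--     if stack:
--         raise Exception('Unmatched brackets')
--     return out
-- ===== Notes on version B (the rewrite author's own statement) =====
-- stated objective: alternative
-- what changed: A repeatedly rescans the whole list, expanding one innermost group per pass and rebuilding the list each time; B expands all groups in a single left-to-right pass using a stack of pending group outputs.
-- outside the precondition, e.g. on _expand_chars([')']): A returns [')'], B raises Exception; on _expand_chars(['(', 'a', ')', ')']): A returns ['a', ')'], B raises Exception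
import Mathlib
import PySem

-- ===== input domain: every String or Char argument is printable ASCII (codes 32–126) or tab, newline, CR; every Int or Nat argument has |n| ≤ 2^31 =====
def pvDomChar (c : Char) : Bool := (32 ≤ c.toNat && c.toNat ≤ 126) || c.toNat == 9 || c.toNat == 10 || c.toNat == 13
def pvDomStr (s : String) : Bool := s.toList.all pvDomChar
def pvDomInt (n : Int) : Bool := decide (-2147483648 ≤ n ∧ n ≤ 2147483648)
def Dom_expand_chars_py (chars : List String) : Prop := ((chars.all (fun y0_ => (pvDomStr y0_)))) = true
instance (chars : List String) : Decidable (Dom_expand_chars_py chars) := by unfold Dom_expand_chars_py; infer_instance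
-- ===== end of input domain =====

-- B replaces A's repeated innermost-group rewriting passes with a single stack-based pass (alternative algorithm, one traversal instead of one per group); neither version mutates its argument.

-- list * n (Python sequence repetition, n from a digit string so n ≥ 0)
def pyListMul (n : Int) (xs : List String) : List String :=
  List.flatten (List.replicate n.toNat xs)

-- ===== PORT A =====
-- inner 'while i < len(chars)' loop of A, transliterated with the scanned prefix
-- 'done' carried explicitly (done = chars[:i], so 'temp_expanded_chars = chars[:i]' is 'done').
-- Returns the new chars on 'break'; 'none' = the loop fell through (or the 'Unmatched
-- brackets' raise) — both leave/abort the Python loop without a break, outside Pre_.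
def aScan (done : List String) (rest : List String) (start : Bool)
    (tec tc : List String) : Option (List String) :=
  match rest with
  | [] => none
  | c :: rest' =>
    if c = "(" then aScan (done ++ [c]) rest' true done []
    else if c = ")" then
      if start = false then none   -- Python: raise Exception('Unmatched brackets')
      else
        match rest' with
        | d :: rest'' =>
          if PySem.Str.strIsdigit d then
            some (tec ++ pyListMul ((PySem.Int.ofStr? d).getD 0) tc ++ rest'')
          else some (tec ++ tc ++ rest')
        | [] => some (tec ++ tc)
    else aScan (done ++ [c]) rest' start tec (if start then tc ++ [c] else tc)

-- outer 'while "(" in chars' loop; fuel makes the (possibly diverging) Python loop total: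
-- each pass removes one "(", so chars.length + 1 passes always suffice when A terminates.
def aLoop : Nat → List String → List String
  | 0, chars => chars
  | fuel + 1, chars =>
    if "(" ∈ chars then
      match aScan [] chars false [] [] with
      | some chars' => aLoop fuel chars'
      | none => chars   -- Python raises or loops forever here; outside Pre_
    else chars

def expand_chars_py (chars : List String) : List String :=
  aLoop (chars.length + 1) chars

-- ===== PORT B =====
-- single pass with a stack of pending groups: 'stack' holds the outputs of enclosing
-- groups, 'out' the current one; ')' pops and repeats by the following digit string.
-- Where Source B raises ('Unmatched brackets') the port returns a dummy value; outside Pre_.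
def bGo (rest : List String) (stack : List (List String)) (out : List String) : List String :=
  match rest with
  | [] => out
  | c :: rest' =>
    if c = "(" then bGo rest' (out :: stack) []
    else if c = ")" then
      match stack with
      | [] => []
      | prev :: stack' =>
        match rest' with
        | d :: rest'' =>
          if PySem.Str.strIsdigit d then
            bGo rest'' stack' (prev ++ pyListMul ((PySem.Int.ofStr? d).getD 0) out)
          else bGo (d :: rest'') stack' (prev ++ out)
        | [] => bGo [] stack' (prev ++ out)
    else bGo rest' stack (out ++ [c])
termination_by rest.length
decreasing_by all_goals simp

def expand_chars_py_alt (chars : List String) : List String :=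
  bGo chars [] []

-- ===== PRECONDITION & SPEC =====
-- bracket-depth automaton: none = a ")" at depth 0
def pvRun : List String → Nat → Option Nat
  | [], d => some d
  | c :: rest, d =>
    if c = "(" then pvRun rest (d + 1)
    else if c = ")" then
      match d with
      | 0 => none
      | d' + 1 => pvRun rest d'
    else pvRun rest d

-- Pre_ excludes inputs with unmatched brackets: on an unclosed "(" A loops forever, on a
-- ")" before any "(" A raises, and on other stray ")" inputs A returns a leftover-")"
-- value while B (a bracket matcher) naturally raises 'Unmatched brackets' there.
def Pre_expand_chars_py (chars : List String) : Prop :=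
  pvRun chars 0 = some 0

instance (chars : List String) : Decidable (Pre_expand_chars_py chars) := by
  unfold Pre_expand_chars_py; infer_instance

def pvWitness_expand_chars_py : List String := ["C", "(", "H", "2", ")", "3", "O"]

def Spec_expand_chars_py (chars : List String) (out : List String) : Prop :=
  out = expand_chars_py_alt chars
instance (chars : List String) (out : List String) : Decidable (Spec_expand_chars_py chars out) := by
  unfold Spec_expand_chars_py; infer_instance

-- ===== CLAIM (what is proved, stated in full; the proofs are below) =====
def Claim_equal_expand_chars_py : Prop := ∀ (chars : List String), Dom_expand_chars_py chars → Pre_expand_chars_py chars → Spec_expand_chars_py chars (expand_chars_py chars)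

-- ===== LEMMAS AND PROOFS =====

-- an element is "neutral" if it is neither bracket
def pvNeutral (c : String) : Prop := c ≠ "(" ∧ c ≠ ")"

-- count of "(" elements
def pvCnt (xs : List String) : Nat := xs.countP (· = "(")

theorem pvCnt_nil : pvCnt [] = 0 := rfl

theorem pvCnt_append (xs ys : List String) : pvCnt (xs ++ ys) = pvCnt xs + pvCnt ys := by
  simp [pvCnt, List.countP_append]

theorem pvCnt_le_length (xs : List String) : pvCnt xs ≤ xs.length :=
  List.countP_le_length

theorem pvCnt_eq_zero_of_neutral (xs : List String) (h : ∀ c ∈ xs, pvNeutral c) :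
    pvCnt xs = 0 := by
  simp only [pvCnt, List.countP_eq_zero]
  intro c hc
  simpa using (h c hc).1

theorem pvNeutral_mul (n : Int) (xs : List String) (h : ∀ c ∈ xs, pvNeutral c) :
    ∀ c ∈ pyListMul n xs, pvNeutral c := by
  intro c hc
  simp only [pyListMul, List.mem_flatten] at hc
  obtain ⟨l, hl, hcl⟩ := hc
  exact h c ((List.eq_of_mem_replicate hl) ▸ hcl)

-- pvRun over an append
theorem pvRun_append (xs ys : List String) (d : Nat) :
    pvRun (xs ++ ys) d = (pvRun xs d).bind (pvRun ys) := by
  induction xs generalizing d with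
  | nil => simp [pvRun]
  | cons c xs ih =>
    simp only [List.cons_append, pvRun]
    split_ifs with h1 h2
    · exact ih _
    · cases d with
      | zero => rfl
      | succ d' => exact ih _
    · exact ih _

theorem pvRun_neutral (xs : List String) (h : ∀ c ∈ xs, pvNeutral c) (d : Nat) :
    pvRun xs d = some d := by
  induction xs with
  | nil => rfl
  | cons c xs ih =>
    have hc := h c (by simp)
    simp only [pvRun, if_neg hc.1, if_neg hc.2]
    exact ih (fun x hx => h x (by simp [hx]))

-- balanced with no "(" means no brackets at all
theorem pvBalanced_no_open_neutral (xs : List String) (hb : pvRun xs 0 = some 0)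
    (ho : "(" ∉ xs) : ∀ c ∈ xs, pvNeutral c := by
  induction xs with
  | nil => intro c hc; simp at hc
  | cons c xs ih =>
    have hcne : c ≠ "(" := fun h => ho (h ▸ List.mem_cons_self)
    have hcne2 : c ≠ ")" := by
      intro h
      rw [h] at hb
      simp [pvRun] at hb
    intro x hx
    rcases List.mem_cons.mp hx with h | h
    · exact h ▸ ⟨hcne, hcne2⟩
    · have hb' : pvRun xs 0 = some 0 := by
        simpa [pvRun, if_neg hcne, if_neg hcne2] using hb
      exact ih hb' (fun hm => ho (List.mem_cons_of_mem _ hm)) x h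

-- single-step unfolding lemmas for bGo
theorem bGo_cons_open (rest : List String) (st : List (List String)) (cur : List String) :
    bGo ("(" :: rest) st cur = bGo rest (cur :: st) [] := by
  rw [bGo.eq_def]
  norm_num

theorem bGo_nil (st : List (List String)) (cur : List String) : bGo [] st cur = cur := by
  rw [bGo.eq_def]

theorem bGo_cons_neutral (c : String) (h1 : c ≠ "(") (h2 : c ≠ ")")
    (rest : List String) (st : List (List String)) (cur : List String) :
    bGo (c :: rest) st cur = bGo rest st (cur ++ [c]) := by
  rw [bGo.eq_def]
  simp only [if_neg h1, if_neg h2]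

theorem bGo_cons_close_digit (d : String) (hd : PySem.Str.strIsdigit d = true)
    (rest : List String) (st : List (List String)) (prev cur : List String) :
    bGo (")" :: d :: rest) (prev :: st) cur
      = bGo rest st (prev ++ pyListMul ((PySem.Int.ofStr? d).getD 0) cur) := by
  rw [bGo.eq_def]
  have hd' : PySem.Chars.strIsdigit d.toList = true := by simpa using hd
  norm_num
  rw [if_neg (show (")" : String) ≠ "(" by decide), if_pos hd']

theorem bGo_cons_close_nondigit (d : String) (hd : PySem.Str.strIsdigit d = false)
    (rest : List String) (st : List (List String)) (prev cur : List String) :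
    bGo (")" :: d :: rest) (prev :: st) cur = bGo (d :: rest) st (prev ++ cur) := by
  rw [bGo.eq_def]
  have hd' : PySem.Chars.strIsdigit d.toList = false := by simpa using hd
  norm_num
  rw [if_neg (show (")" : String) ≠ "(" by decide), if_neg (by simp [hd'])]

theorem bGo_cons_close_last (st : List (List String)) (prev cur : List String) :
    bGo [")"] (prev :: st) cur = bGo [] st (prev ++ cur) := by
  rw [bGo.eq_def]
  norm_num
  exact fun h => absurd h (by decide)

-- B skips a bracket-free block by appending it to the current output
theorem bGo_neutral (u : List String) (h : ∀ c ∈ u, pvNeutral c) :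
    ∀ (rest : List String) (st : List (List String)) (cur : List String),
      bGo (u ++ rest) st cur = bGo rest st (cur ++ u) := by
  induction u with
  | nil => intro rest st cur; simp
  | cons c u ih =>
    intro rest st cur
    have hc := h c (by simp)
    rw [List.cons_append, bGo_cons_neutral c hc.1 hc.2,
      ih (fun x hx => h x (by simp [hx])) rest st (cur ++ [c])]
    simp

-- congruence: processing a ")"-free prefix is lookahead-free, so it commutes with
-- replacing the continuation by a pointwise-equal one
theorem bGo_congr (u : List String) (hu : ∀ c ∈ u, c ≠ ")")
    (X Y : List String)
    (hXY : ∀ st cur, bGo X st cur = bGo Y st cur) :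
    ∀ st cur, bGo (u ++ X) st cur = bGo (u ++ Y) st cur := by
  induction u with
  | nil => intro st cur; simpa using hXY st cur
  | cons c u ih =>
    intro st cur
    have hc := hu c (by simp)
    have ih' := ih (fun x hx => hu x (by simp [hx]))
    by_cases h1 : c = "("
    · subst h1
      rw [List.cons_append, List.cons_append, bGo_cons_open, bGo_cons_open]
      exact ih' _ _
    · rw [List.cons_append, List.cons_append, bGo_cons_neutral c h1 hc,
        bGo_cons_neutral c h1 hc]
      exact ih' _ _

-- the core rewriting step is invisible to B (digit-multiplier case)
theorem bGo_step_digit (tc : List String) (htc : ∀ c ∈ tc, pvNeutral c)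
    (d : String) (hd : PySem.Str.strIsdigit d = true) (rest : List String) :
    ∀ st cur, bGo (["("] ++ tc ++ [")"] ++ d :: rest) st cur
      = bGo (pyListMul ((PySem.Int.ofStr? d).getD 0) tc ++ rest) st cur := by
  intro st cur
  rw [show ["("] ++ tc ++ [")"] ++ d :: rest = "(" :: (tc ++ (")" :: d :: rest)) by simp,
    bGo_cons_open, bGo_neutral tc htc, List.nil_append, bGo_cons_close_digit d hd,
    bGo_neutral _ (pvNeutral_mul _ _ htc)]

-- the core rewriting step is invisible to B (no-multiplier case); the continuation must
-- not start with a digit string, matching the branch in which A takes n = 1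
theorem bGo_step_one (tc : List String) (htc : ∀ c ∈ tc, pvNeutral c)
    (rest : List String)
    (hrest : rest = [] ∨ ∃ d rest', rest = d :: rest' ∧ PySem.Str.strIsdigit d = false) :
    ∀ st cur, bGo (["("] ++ tc ++ [")"] ++ rest) st cur = bGo (tc ++ rest) st cur := by
  intro st cur
  rw [show ["("] ++ tc ++ [")"] ++ rest = "(" :: (tc ++ (")" :: rest)) by simp,
    bGo_cons_open, bGo_neutral tc htc, List.nil_append, bGo_neutral tc htc]
  rcases hrest with h | ⟨d, rest', hr, hdn⟩
  · subst h
    rw [bGo_cons_close_last, bGo_nil]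
  · subst hr
    rw [bGo_cons_close_nondigit d hdn]

theorem pvCnt_cons_open (xs : List String) : pvCnt ("(" :: xs) = pvCnt xs + 1 := by
  simp [pvCnt, List.countP_cons]

theorem pvCnt_cons_ne (c : String) (xs : List String) (h : c ≠ "(") :
    pvCnt (c :: xs) = pvCnt xs := by
  simp [pvCnt, List.countP_cons, h]

theorem pvCnt_cons_close (xs : List String) : pvCnt (")" :: xs) = pvCnt xs :=
  pvCnt_cons_ne _ _ (by decide)

-- a ")"-free list runs the automaton up by its "(" count
theorem pvRun_no_rp (xs : List String) (h : ∀ c ∈ xs, c ≠ ")") (d : Nat) :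
    pvRun xs d = some (d + pvCnt xs) := by
  induction xs generalizing d with
  | nil => simp [pvRun, pvCnt]
  | cons c xs ih =>
    have hc := h c (by simp)
    have ih' := ih (fun x hx => h x (by simp [hx]))
    by_cases ho : c = "("
    · subst ho
      have h0 : pvRun ("(" :: xs) d = pvRun xs (d + 1) := by simp [pvRun]
      rw [h0, ih', pvCnt_cons_open]
      congr 1
      omega
    · simp only [pvRun, if_neg ho, if_neg hc, ih', pvCnt_cons_ne c xs ho]

-- main scan lemma, started phase: the scanned prefix is tec ++ ["("] ++ tc with tc
-- bracket-free and tec ")"-free; a balanced continuation at positive depth yields a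
-- successful break whose result B cannot distinguish from the input, is still balanced,
-- and has one "(" fewer.
theorem aScan_started (rest : List String) :
    ∀ (tec tc : List String),
      (∀ c ∈ tc, pvNeutral c) →
      (∀ c ∈ tec, c ≠ ")") →
      pvRun rest (pvCnt tec + 1) = some 0 →
      ∃ c', aScan (tec ++ ["("] ++ tc) rest true tec tc = some c'
        ∧ (∀ st cur, bGo ((tec ++ ["("] ++ tc) ++ rest) st cur = bGo c' st cur)
        ∧ pvRun c' 0 = some 0
        ∧ pvCnt c' + 1 = pvCnt ((tec ++ ["("] ++ tc) ++ rest) := by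
  induction rest with
  | nil =>
    intro tec tc htc htec hrun
    simp [pvRun] at hrun
  | cons c rest ih =>
    intro tec tc htc htec hrun
    have hcnt_tc : pvCnt tc = 0 := pvCnt_eq_zero_of_neutral tc htc
    by_cases h1 : c = "("
    · subst h1
      have hcntd : pvCnt (tec ++ ["("] ++ tc) = pvCnt tec + 1 := by
        simp [pvCnt_append, hcnt_tc, pvCnt_cons_open]
      have hrun' : pvRun rest (pvCnt (tec ++ ["("] ++ tc) + 1) = some 0 := by
        rw [hcntd]; simpa [pvRun] using hrun
      obtain ⟨c', hsc, hgo, hbal, hcnt⟩ :=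
        ih (tec ++ ["("] ++ tc) [] (by simp)
          (by intro x hx
              simp only [List.mem_append, List.mem_singleton] at hx
              rcases hx with (hx | hx) | hx
              · exact htec x hx
              · subst hx; decide
              · exact (htc x hx).2) hrun'
      refine ⟨c', ?_, ?_, hbal, ?_⟩
      · simpa [aScan] using hsc
      · intro st cur
        have := hgo st cur
        simpa [List.append_assoc] using this
      · simp only [pvCnt_append, List.append_assoc, List.singleton_append,
          pvCnt_cons_open, pvCnt_nil] at hcnt ⊢
        omega
    · by_cases h2 : c = ")"
      · subst h2
        have hrun0 : pvRun rest (pvCnt tec) = some 0 := by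
          simpa [pvRun] using hrun
        match rest, hrun0 with
        | d :: rest', hrun0 =>
          by_cases hd : PySem.Str.strIsdigit d = true
          · have hd' : PySem.Chars.strIsdigit d.toList = true := by simpa using hd
            have hdnb : pvNeutral d := by
              constructor <;> (intro h; subst h; revert hd; decide)
            refine ⟨tec ++ pyListMul ((PySem.Int.ofStr? d).getD 0) tc ++ rest', ?_, ?_, ?_, ?_⟩
            · simp [aScan, hd']
            · intro st cur
              have hcg := bGo_congr tec htec
                (["("] ++ tc ++ [")"] ++ d :: rest')
                (pyListMul ((PySem.Int.ofStr? d).getD 0) tc ++ rest')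
                (bGo_step_digit tc htc d hd rest') st cur
              simpa [List.append_assoc] using hcg
            · have hrun' : pvRun rest' (pvCnt tec) = some 0 := by
                simpa [pvRun, if_neg hdnb.1, if_neg hdnb.2] using hrun0
              rw [show tec ++ pyListMul ((PySem.Int.ofStr? d).getD 0) tc ++ rest'
                  = tec ++ (pyListMul ((PySem.Int.ofStr? d).getD 0) tc ++ rest') by simp,
                pvRun_append, pvRun_no_rp tec htec]
              simp only [Option.bind_some, Nat.zero_add]
              rw [pvRun_append, pvRun_neutral _ (pvNeutral_mul _ _ htc)]
              simpa using hrun'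
            · have hm : pvCnt (pyListMul ((PySem.Int.ofStr? d).getD 0) tc) = 0 :=
                pvCnt_eq_zero_of_neutral _ (pvNeutral_mul _ _ htc)
              simp only [pvCnt_append, List.append_assoc, List.singleton_append,
                pvCnt_cons_open, pvCnt_cons_close, pvCnt_cons_ne d rest' hdnb.1,
                hm, hcnt_tc]
              omega
          · have hdf : PySem.Str.strIsdigit d = false := by
              revert hd; cases PySem.Str.strIsdigit d <;> simp
            have hd' : PySem.Chars.strIsdigit d.toList = false := by simpa using hdf
            refine ⟨tec ++ tc ++ (d :: rest'), ?_, ?_, ?_, ?_⟩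
            · simp [aScan, hd']
            · intro st cur
              have hcg := bGo_congr tec htec
                (["("] ++ tc ++ [")"] ++ d :: rest')
                (tc ++ d :: rest')
                (bGo_step_one tc htc (d :: rest')
                  (Or.inr ⟨d, rest', rfl, hdf⟩)) st cur
              simpa [List.append_assoc] using hcg
            · rw [show tec ++ tc ++ (d :: rest') = tec ++ (tc ++ d :: rest') by simp,
                pvRun_append, pvRun_no_rp tec htec]
              simp only [Option.bind_some, Nat.zero_add]
              rw [pvRun_append, pvRun_neutral _ htc]
              simpa using hrun0
            · simp only [pvCnt_append, List.append_assoc, List.singleton_append,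
                pvCnt_cons_open, pvCnt_cons_close, hcnt_tc]
              omega
        | [], hrun0 =>
          have hk : pvCnt tec = 0 := by simpa [pvRun] using hrun0
          refine ⟨tec ++ tc, ?_, ?_, ?_, ?_⟩
          · simp [aScan]
          · intro st cur
            have hcg := bGo_congr tec htec
              (["("] ++ tc ++ [")"]) tc
              (by
                intro st' cur'
                have := bGo_step_one tc htc [] (Or.inl rfl) st' cur'
                simpa using this) st cur
            simpa [List.append_assoc] using hcg
          · rw [pvRun_append, pvRun_no_rp tec htec]
            simp only [Option.bind_some, Nat.zero_add, hk]
            exact pvRun_neutral tc htc 0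
          · simp only [pvCnt_append, List.append_assoc, List.singleton_append,
              pvCnt_cons_open, pvCnt_cons_close, pvCnt_nil, hcnt_tc, hk]
      · -- neutral element: keep scanning
        have hc : pvNeutral c := ⟨h1, h2⟩
        have hrun' : pvRun rest (pvCnt tec + 1) = some 0 := by
          simpa [pvRun, if_neg h1, if_neg h2] using hrun
        obtain ⟨c', hsc, hgo, hbal, hcnt⟩ :=
          ih tec (tc ++ [c])
            (by intro x hx
                rcases List.mem_append.mp hx with h | h
                · exact htc x h
                · simp at h; exact h ▸ hc)
            htec hrun'
        refine ⟨c', ?_, ?_, hbal, ?_⟩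
        · have : aScan (tec ++ ["("] ++ tc) (c :: rest) true tec tc
              = aScan (tec ++ ["("] ++ tc ++ [c]) rest true tec (tc ++ [c]) := by
            simp [aScan, if_neg h1, if_neg h2]
          rw [this]
          simpa [List.append_assoc] using hsc
        · intro st cur
          have := hgo st cur
          simp only [List.append_assoc] at this ⊢
          simpa using this
        · simp only [pvCnt_append] at hcnt ⊢
          simp only [pvCnt, List.countP_cons] at hcnt ⊢
          simp at hcnt ⊢
          omega

-- unstarted phase: before the first "(" every element is neutral (a ")" would make the
-- input unbalanced); once "(" appears, hand over to aScan_started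
theorem aScan_unstarted (rest : List String) :
    ∀ (done tec tc : List String),
      (∀ c ∈ done, pvNeutral c) →
      pvRun rest 0 = some 0 →
      "(" ∈ rest →
      ∃ c', aScan done rest false tec tc = some c'
        ∧ (∀ st cur, bGo (done ++ rest) st cur = bGo c' st cur)
        ∧ pvRun c' 0 = some 0
        ∧ pvCnt c' + 1 = pvCnt (done ++ rest) := by
  induction rest with
  | nil => intro done tec tc _ _ hmem; simp at hmem
  | cons c rest ih =>
    intro done tec tc hdone hrun hmem
    by_cases h1 : c = "("
    · subst h1
      have hrun' : pvRun rest (pvCnt done + 1) = some 0 := by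
        rw [pvCnt_eq_zero_of_neutral done hdone]
        simpa [pvRun] using hrun
      obtain ⟨c', hsc, hgo, hbal, hcnt⟩ :=
        aScan_started rest done [] (by simp) (fun x hx => (hdone x hx).2) hrun'
      refine ⟨c', ?_, ?_, hbal, ?_⟩
      · simpa [aScan] using hsc
      · intro st cur
        have := hgo st cur
        simpa [List.append_assoc] using this
      · simpa [List.append_assoc] using hcnt
    · by_cases h2 : c = ")"
      · subst h2
        simp [pvRun] at hrun
      · have hc : pvNeutral c := ⟨h1, h2⟩
        have hrun' : pvRun rest 0 = some 0 := by
          simpa [pvRun, if_neg h1, if_neg h2] using hrun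
        have hmem' : "(" ∈ rest := by
          rcases List.mem_cons.mp hmem with h | h
          · exact absurd h.symm h1
          · exact h
        obtain ⟨c', hsc, hgo, hbal, hcnt⟩ :=
          ih (done ++ [c]) tec tc
            (by intro x hx
                rcases List.mem_append.mp hx with h | h
                · exact hdone x h
                · simp at h; exact h ▸ hc)
            hrun' hmem'
        refine ⟨c', ?_, ?_, hbal, ?_⟩
        · simpa [aScan, if_neg h1, if_neg h2] using hsc
        · intro st cur
          have := hgo st cur
          simpa [List.append_assoc] using this
        · simpa [List.append_assoc] using hcnt

-- the outer loop: with enough fuel, A's repeated rewriting computes exactly B's value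
theorem aLoop_eq_bGo (fuel : Nat) :
    ∀ chars : List String, pvRun chars 0 = some 0 → pvCnt chars < fuel →
      aLoop fuel chars = bGo chars [] [] := by
  induction fuel with
  | zero => intro chars _ h; omega
  | succ fuel ih =>
    intro chars hbal hcnt
    by_cases hmem : "(" ∈ chars
    · obtain ⟨c', hsc, hgo, hbal', hcnt'⟩ :=
        aScan_unstarted chars [] [] [] (by simp) hbal hmem
      have hstep : aLoop (fuel + 1) chars = aLoop fuel c' := by
        simp [aLoop, hmem, hsc]
      rw [hstep, ih c' hbal' (by simp at hcnt'; omega)]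
      have := hgo [] []
      simpa using this.symm
    · have hneu := pvBalanced_no_open_neutral chars hbal hmem
      have : bGo chars [] [] = chars := by
        have := bGo_neutral chars hneu [] [] []
        simpa [bGo_nil] using this
      simp [aLoop, hmem, this]

theorem expand_chars_py_eq (chars : List String) (h : pvRun chars 0 = some 0) :
    expand_chars_py chars = expand_chars_py_alt chars := by
  have hle := pvCnt_le_length chars
  exact aLoop_eq_bGo (chars.length + 1) chars h (by omega)

-- ===== VERDICT (by name: the statement is the Claim_ definition above) =====
theorem expand_chars_py_spec : Claim_equal_expand_chars_py := by
  intro chars _ hpre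
  exact expand_chars_py_eq chars hpre
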